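-- pv_equiv track=rewrite | github.com/rdkit/AutomatedSeriesClassification | AutomatedSeriesClassification/UPGMAclustering.py | CalcSizeAndAssignment
-- ===== SOURCE A (Python) =====
-- def CalcSizeAndAssignment(children,Ndata):
--     # Assigns molecules to the clusters of the UPGMA tree
--     NumMolList=[]
--     MolDict={}
--     for i in range(len(children)):
--         N=0
--         mols_assigned=[]
--         for j in range(len(children[i])):
--             if children[i][j]<Ndata:
--                 N+=1
--                 mols_assigned.append(children[i][j])
--             else:
--                 N+=NumMolList[children[i][j]-Ndata]
--                 mols_assigned+=MolDict[children[i][j]]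
--         NumMolList.append(N)
--         MolDict[i+Ndata]=mols_assigned
--     return NumMolList, MolDict
-- ===== SOURCE B (Python) =====
-- def CalcSizeAndAssignment(children, Ndata):
--     # Memoized depth-first recursion: leaves(node) returns (and caches) the
--     # leaf molecules of a tree node; counts are taken as the list lengths.
--     MolDict = {}
--
--     def leaves(node):
--         if node in MolDict:
--             return MolDict[node]
--         mols = []
--         for c in children[node - Ndata]:
--             if c < Ndata:
--                 mols.append(c)
--             else:
--                 mols.extend(leaves(c))
--         MolDict[node] = mols
--         return mols
--
--     for i in range(len(children)):
--         leaves(i + Ndata)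
--     NumMolList = [len(MolDict[i + Ndata]) for i in range(len(children))]
--     return NumMolList, MolDict
-- ===== Notes on version B (the rewrite author's own statement) =====
-- stated objective: alternative
-- what changed: Replaces A's dynamic-programming loop that maintains a parallel count list and concatenates cached sublists by index with a memoized depth-first recursion leaves(node) over the tree, counts being derived at the end as the lengths of the cached leaf lists.
import Mathlib
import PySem

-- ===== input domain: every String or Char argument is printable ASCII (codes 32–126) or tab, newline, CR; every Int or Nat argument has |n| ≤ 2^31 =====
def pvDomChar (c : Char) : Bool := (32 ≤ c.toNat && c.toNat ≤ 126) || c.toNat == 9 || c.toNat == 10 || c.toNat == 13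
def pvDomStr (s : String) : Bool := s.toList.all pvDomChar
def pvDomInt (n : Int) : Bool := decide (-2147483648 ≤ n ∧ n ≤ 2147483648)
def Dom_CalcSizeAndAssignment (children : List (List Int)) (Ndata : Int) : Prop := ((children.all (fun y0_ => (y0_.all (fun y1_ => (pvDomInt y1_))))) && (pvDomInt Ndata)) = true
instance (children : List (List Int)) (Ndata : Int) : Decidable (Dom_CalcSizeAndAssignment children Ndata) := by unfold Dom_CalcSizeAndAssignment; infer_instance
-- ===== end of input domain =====

-- B replaces A's dynamic-programming loop (parallel count list + indexed concatenation of cached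
-- sublists) by a memoized depth-first recursion over the tree; counts are read off as list lengths.


-- ===== PORT A =====
-- Literal port of A: for i in range(len(children)): inner loop over j accumulating (N, mols_assigned)
-- from NumMolList / MolDict built so far; the defaults of pyGetD / Dict.getD are reached exactly where
-- the Python raises IndexError/KeyError, which Pre_ excludes.
def CalcSizeAndAssignment (children : List (List Int)) (Ndata : Int) : List Int × (List (Int × List Int)) :=
  let st := (PySem.List.pyRange 0 (children.length : Int) 1).foldl
    (fun (st : List Int × PySem.Dict Int (List Int)) i =>
      let row := PySem.List.pyGetD children i []
      let inner := (PySem.List.pyRange 0 (row.length : Int) 1).foldl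
        (fun (nm : Int × List Int) j =>
          let c := PySem.List.pyGetD row j 0
          if c < Ndata then (nm.1 + 1, nm.2 ++ [c])
          else (nm.1 + PySem.List.pyGetD st.1 (c - Ndata) 0, nm.2 ++ st.2.getD c []))
        (0, [])
      (st.1 ++ [inner.1], st.2.insert (i + Ndata) inner.2))
    ([], PySem.Dict.empty)
  (st.1, st.2.items)

-- ===== PORT B =====
-- leaves(node) of Source B: memo lookup, else fold over children[node - Ndata], recursing on internal
-- children; the fuel argument only makes the recursion structural (never exhausted under Pre_).
def pvAltLeaves (children : List (List Int)) (Ndata : Int) :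
    Nat → Int → PySem.Dict Int (List Int) → List Int × PySem.Dict Int (List Int)
  | 0, _, d => ([], d)
  | fuel + 1, node, d =>
    match d.get? node with
    | some l => (l, d)
    | none =>
      let st := (PySem.List.pyGetD children (node - Ndata) []).foldl
        (fun (st : List Int × PySem.Dict Int (List Int)) c =>
          if c < Ndata then (st.1 ++ [c], st.2)
          else
            let r := pvAltLeaves children Ndata fuel c st.2
            (st.1 ++ r.1, r.2))
        ([], d)
      (st.1, st.2.insert node st.1)

def CalcSizeAndAssignment_alt (children : List (List Int)) (Ndata : Int) : List Int × (List (Int × List Int)) :=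
  let d := (PySem.List.pyRange 0 (children.length : Int) 1).foldl
    (fun d i => (pvAltLeaves children Ndata (children.length + 1) (i + Ndata) d).2)
    PySem.Dict.empty
  ((PySem.List.pyRange 0 (children.length : Int) 1).map
      (fun i => ((d.getD (i + Ndata) []).length : Int)),
    d.items)

-- ===== PRECONDITION & SPEC =====
-- Pre_ excludes exactly the inputs on which A raises (IndexError/KeyError): a child entry ≥ Ndata
-- referring to a tree node not yet built, i.e. some c ∈ children[i] with Ndata + i ≤ c.
def Pre_CalcSizeAndAssignment (children : List (List Int)) (Ndata : Int) : Prop :=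
  ∀ p ∈ children.zipIdx, ∀ c ∈ p.1, c < Ndata + p.2
instance (children : List (List Int)) (Ndata : Int) : Decidable (Pre_CalcSizeAndAssignment children Ndata) := by unfold Pre_CalcSizeAndAssignment; infer_instance

def pvWitness_CalcSizeAndAssignment : List (List Int) × Int := ([[0, 1], [2, 1], [3, 0]], 2)

def Spec_CalcSizeAndAssignment (children : List (List Int)) (Ndata : Int) (out : List Int × (List (Int × List Int))) : Prop := out = CalcSizeAndAssignment_alt children Ndata
instance (children : List (List Int)) (Ndata : Int) (out : List Int × (List (Int × List Int))) : Decidable (Spec_CalcSizeAndAssignment children Ndata out) := by unfold Spec_CalcSizeAndAssignment; infer_instance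

-- ===== CLAIM (what is proved, stated in full; the proofs are below) =====
def Claim_equal_CalcSizeAndAssignment : Prop := ∀ (children : List (List Int)) (Ndata : Int), Dom_CalcSizeAndAssignment children Ndata → Pre_CalcSizeAndAssignment children Ndata → Spec_CalcSizeAndAssignment children Ndata (CalcSizeAndAssignment children Ndata)

-- ===== LEMMAS AND PROOFS =====

-- The reference: pvL i = the leaf lists of the first i tree nodes, in order.
def pvL (children : List (List Int)) (Ndata : Int) : Nat → List (List Int)
  | 0 => []
  | i + 1 =>
    let L := pvL children Ndata i
    L ++ [(PySem.List.pyGetD children (i : Int) []).flatMap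
            (fun c => if c < Ndata then [c] else L.getD (c - Ndata).toNat [])]

-- The dictionary both programs have built after i steps.
def pvDictOf (Ndata : Int) (L : List (List Int)) : PySem.Dict Int (List Int) :=
  PySem.Dict.mk ((L.zipIdx).map (fun p => ((p.2 : Int) + Ndata, p.1)))

lemma pvL_length (children : List (List Int)) (Ndata : Int) (i : Nat) :
    (pvL children Ndata i).length = i := by
  induction i with
  | zero => rfl
  | succ i ih => simp [pvL, ih]

lemma pvDictOf_get?_ge (Ndata : Int) (L : List (List Int)) :
    ∀ (s : Nat) (x : Int), (s : Int) + (L.length : Int) + Ndata ≤ x →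
      (PySem.Dict.mk ((L.zipIdx s).map (fun p => ((p.2 : Int) + Ndata, p.1)))).get? x = none := by
  induction L with
  | nil => intro s x _; simp [PySem.Dict.get?]
  | cons a L ih =>
    intro s x hx
    simp only [List.length_cons] at hx
    rw [List.zipIdx_cons]
    simp only [List.map_cons, PySem.Dict.get?_mk_cons]
    rw [if_neg (by simp; omega)]
    exact ih (s + 1) x (by push_cast at hx ⊢; omega)

lemma pvDictOf_get?_mem (Ndata : Int) (L : List (List Int)) :
    ∀ (s k : Nat), k < L.length →
      (PySem.Dict.mk ((L.zipIdx s).map (fun p => ((p.2 : Int) + Ndata, p.1)))).get?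
          (((s + k : Nat) : Int) + Ndata) = some (L.getD k []) := by
  induction L with
  | nil => intro s k hk; simp at hk
  | cons a L ih =>
    intro s k hk
    rw [List.zipIdx_cons]
    simp only [List.map_cons, PySem.Dict.get?_mk_cons]
    cases k with
    | zero => rw [if_pos (by simp)]; rfl
    | succ k =>
      rw [if_neg (by simp; omega)]
      have heq : s + 1 + k = s + (k + 1) := by omega
      rw [← heq]
      exact ih (s + 1) k (by simpa using hk)

lemma pvDictOf_get?_of_lt (Ndata : Int) (L : List (List Int)) (k : Nat) (hk : k < L.length) :
    (pvDictOf Ndata L).get? ((k : Int) + Ndata) = some (L.getD k []) := by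
  have := pvDictOf_get?_mem Ndata L 0 k hk
  simpa [pvDictOf] using this

lemma pvDictOf_get?_top (Ndata : Int) (L : List (List Int)) (x : Int)
    (hx : (L.length : Int) + Ndata ≤ x) : (pvDictOf Ndata L).get? x = none := by
  have := pvDictOf_get?_ge Ndata L 0 x (by push_cast; omega)
  simpa [pvDictOf] using this

lemma pvDictOf_snoc (Ndata : Int) (L : List (List Int)) (l : List Int) :
    pvDictOf Ndata (L ++ [l]) = (pvDictOf Ndata L).insert ((L.length : Int) + Ndata) l := by
  apply PySem.Dict.ext
  have hnc : (pvDictOf Ndata L).contains ((L.length : Int) + Ndata) = false := by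
    rw [PySem.Dict.contains_eq_isSome_get?, pvDictOf_get?_top Ndata L _ (by omega)]
    rfl
  rw [PySem.Dict.items_insert_of_not_contains (pvDictOf Ndata L) l hnc]
  simp [pvDictOf, List.zipIdx_append]

-- A's inner loop over one row, given the state built so far.
lemma pvInnerA (Ndata : Int) (L : List (List Int)) (i : Nat) (hiL : L.length = i) :
    ∀ (row : List Int), (∀ c ∈ row, c < Ndata + (i : Int)) →
      ∀ (n : Int) (m : List Int),
      row.foldl
        (fun (nm : Int × List Int) c =>
          if c < Ndata then (nm.1 + 1, nm.2 ++ [c])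
          else (nm.1 + PySem.List.pyGetD (L.map (fun l => (l.length : Int))) (c - Ndata) 0,
                nm.2 ++ (pvDictOf Ndata L).getD c []))
        (n, m)
      = (n + ((row.flatMap (fun c => if c < Ndata then [c] else L.getD (c - Ndata).toNat [])).length : Int),
         m ++ row.flatMap (fun c => if c < Ndata then [c] else L.getD (c - Ndata).toNat [])) := by
  intro row hrow
  induction row with
  | nil => intro n m; simp
  | cons c row ih =>
    intro n m
    have hc := hrow c (by simp)
    by_cases hlt : c < Ndata
    · simp only [List.foldl_cons, if_pos hlt]
      rw [ih (fun c hc => hrow c (by simp [hc]))]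
      refine Prod.ext ?_ ?_
      · simp [hlt]; omega
      · simp [hlt]
    · have h0 : 0 ≤ c - Ndata := by omega
      have h1 : c - Ndata < (L.length : Int) := by omega
      have hkey : c = ((c - Ndata).toNat : Int) + Ndata := by omega
      have hget : (pvDictOf Ndata L).getD c [] = L.getD (c - Ndata).toNat [] := by
        rw [PySem.Dict.getD_eq_get?_getD]
        conv_lhs => rw [hkey]
        rw [pvDictOf_get?_of_lt Ndata L (c - Ndata).toNat (by omega)]
        rfl
      have hnum : PySem.List.pyGetD (L.map (fun l => (l.length : Int))) (c - Ndata) 0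
          = ((L.getD (c - Ndata).toNat []).length : Int) := by
        rw [PySem.List.pyGetD_eq_getElem _ 0 h0 (by simpa using h1)]
        rw [List.getElem_map, List.getD_eq_getElem _ _ (by omega)]
      simp only [List.foldl_cons, if_neg hlt, hget, hnum]
      rw [ih (fun c hc => hrow c (by simp [hc]))]
      refine Prod.ext ?_ ?_
      · simp [hlt]; omega
      · simp [hlt, List.append_assoc]

-- B's inner loop: every recursive call is answered from the memo, the dictionary never changes.
lemma pvInnerB (children : List (List Int)) (Ndata : Int) (L : List (List Int)) (i : Nat)
    (hiL : L.length = i) (fuel : Nat) (hfuel : 0 < fuel) :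
    ∀ (row : List Int), (∀ c ∈ row, c < Ndata + (i : Int)) →
      ∀ (m : List Int),
      row.foldl
        (fun (st : List Int × PySem.Dict Int (List Int)) c =>
          if c < Ndata then (st.1 ++ [c], st.2)
          else
            let r := pvAltLeaves children Ndata fuel c st.2
            (st.1 ++ r.1, r.2))
        (m, pvDictOf Ndata L)
      = (m ++ row.flatMap (fun c => if c < Ndata then [c] else L.getD (c - Ndata).toNat []),
         pvDictOf Ndata L) := by
  intro row hrow
  induction row with
  | nil => intro m; simp
  | cons c row ih =>
    intro m
    have hc := hrow c (by simp)
    by_cases hlt : c < Ndata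
    · simp only [List.foldl_cons, if_pos hlt]
      rw [ih (fun c hc => hrow c (by simp [hc]))]
      simp [hlt]
    · have hkey : c = ((c - Ndata).toNat : Int) + Ndata := by omega
      have hget : (pvDictOf Ndata L).get? c = some (L.getD (c - Ndata).toNat []) := by
        conv_lhs => rw [hkey]
        exact pvDictOf_get?_of_lt Ndata L (c - Ndata).toNat (by omega)
      have hstep : pvAltLeaves children Ndata fuel c (pvDictOf Ndata L)
          = (L.getD (c - Ndata).toNat [], pvDictOf Ndata L) := by
        obtain ⟨fuel', rfl⟩ : ∃ f, fuel = f + 1 := ⟨fuel - 1, by omega⟩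
        simp [pvAltLeaves, hget]
      simp only [List.foldl_cons, if_neg hlt, hstep]
      rw [ih (fun c hc => hrow c (by simp [hc]))]
      simp [hlt, List.append_assoc]

-- Both outer loops, run over range(i), reach the same state, described by pvL.
lemma pvLoop (children : List (List Int)) (Ndata : Int)
    (hpre : Pre_CalcSizeAndAssignment children Ndata) :
    ∀ i : Nat, i ≤ children.length →
      ((PySem.List.pyRange 0 (i : Int) 1).foldl
        (fun (st : List Int × PySem.Dict Int (List Int)) iv =>
          let row := PySem.List.pyGetD children iv []
          let inner := (PySem.List.pyRange 0 (row.length : Int) 1).foldl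
            (fun (nm : Int × List Int) j =>
              let c := PySem.List.pyGetD row j 0
              if c < Ndata then (nm.1 + 1, nm.2 ++ [c])
              else (nm.1 + PySem.List.pyGetD st.1 (c - Ndata) 0, nm.2 ++ st.2.getD c []))
            (0, [])
          (st.1 ++ [inner.1], st.2.insert (iv + Ndata) inner.2))
        ([], PySem.Dict.empty)
        = ((pvL children Ndata i).map (fun l => (l.length : Int)), pvDictOf Ndata (pvL children Ndata i)))
      ∧ ((PySem.List.pyRange 0 (i : Int) 1).foldl
          (fun d iv => (pvAltLeaves children Ndata (children.length + 1) (iv + Ndata) d).2)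
          PySem.Dict.empty
        = pvDictOf Ndata (pvL children Ndata i)) := by
  intro i
  induction i with
  | zero => intro _; constructor <;> rfl
  | succ i ih =>
    intro hle
    have hi : i < children.length := by omega
    obtain ⟨ihA, ihB⟩ := ih (by omega)
    have hrange : PySem.List.pyRange 0 ((i : Int) + 1) 1
        = PySem.List.pyRange 0 (i : Int) 1 ++ [(i : Int)] := by
      exact PySem.List.pyRange_one_succ_right (by positivity)
    set L := pvL children Ndata i with hL
    have hLlen : L.length = i := pvL_length children Ndata i
    have hrowval : PySem.List.pyGetD children (i : Int) [] = children.getD i [] := by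
      simp [PySem.List.pyGetD_natCast]
    have hrowmem : ∀ c ∈ PySem.List.pyGetD children (i : Int) [], c < Ndata + (i : Int) := by
      intro c hc
      rw [hrowval, List.getD_eq_getElem _ _ hi] at hc
      have hp : (children[i], i) ∈ children.zipIdx := by
        rw [List.mem_zipIdx_iff_getElem?]; simp [hi]
      exact hpre _ hp c hc
    set row := PySem.List.pyGetD children (i : Int) [] with hrowdef
    set flat := row.flatMap (fun c => if c < Ndata then [c] else L.getD (c - Ndata).toNat [])
      with hflat
    have hLsucc : pvL children Ndata (i + 1) = L ++ [flat] := by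
      simp only [pvL, ← hL, ← hrowdef, ← hflat]
    constructor
    · push_cast
      rw [hrange, List.foldl_append, ihA]
      simp only [List.foldl_cons, List.foldl_nil]
      rw [← hrowdef]
      rw [PySem.List.foldl_pyRange_zero_pyGetD' row 0
        (fun (nm : Int × List Int) c =>
          if c < Ndata then (nm.1 + 1, nm.2 ++ [c])
          else (nm.1 + PySem.List.pyGetD (L.map (fun l => (l.length : Int))) (c - Ndata) 0,
                nm.2 ++ (pvDictOf Ndata L).getD c [])) (0, [])]
      rw [pvInnerA Ndata L i hLlen row hrowmem 0 []]
      rw [hLsucc, pvDictOf_snoc, hLlen]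
      refine Prod.ext ?_ ?_
      · simp [hflat, List.length_flatMap]
      · simp only []
        rfl
    · push_cast
      rw [hrange, List.foldl_append, ihB]
      simp only [List.foldl_cons, List.foldl_nil]
      have hfresh : (pvDictOf Ndata L).get? ((i : Int) + Ndata) = none :=
        pvDictOf_get?_top Ndata L _ (by omega)
      show (pvAltLeaves children Ndata (children.length + 1) ((i : Int) + Ndata) (pvDictOf Ndata L)).2 = _
      rw [pvAltLeaves]
      simp only [hfresh]
      have harg : (i : Int) + Ndata - Ndata = (i : Int) := by ring
      rw [harg, ← hrowdef]
      rw [pvInnerB children Ndata L i hLlen children.length (by omega) row hrowmem []]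
      rw [hLsucc, pvDictOf_snoc, hLlen]
      rfl

lemma pvFinalNum (children : List (List Int)) (Ndata : Int) (L : List (List Int))
    (hlen : L.length = children.length) :
    (PySem.List.pyRange 0 (children.length : Int) 1).map
        (fun i => (((pvDictOf Ndata L).getD (i + Ndata) []).length : Int))
      = L.map (fun l => (l.length : Int)) := by
  rw [PySem.List.pyRange_one, List.map_map]
  apply List.ext_getElem
  · simp [hlen]
  · intro k h1 h2
    simp only [List.getElem_map, List.getElem_range, Function.comp]
    have hk : k < L.length := by simpa [hlen] using h2
    rw [PySem.Dict.getD_eq_get?_getD]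
    rw [show (0 : Int) + (k : Int) + Ndata = (k : Int) + Ndata by ring]
    rw [pvDictOf_get?_of_lt Ndata L k hk]
    simp [hk]

-- ===== VERDICT (by name: the statement is the Claim_ definition above) =====
theorem CalcSizeAndAssignment_spec : Claim_equal_CalcSizeAndAssignment := by
  intro children Ndata _ hpre
  unfold Spec_CalcSizeAndAssignment CalcSizeAndAssignment CalcSizeAndAssignment_alt
  obtain ⟨hA, hB⟩ := pvLoop children Ndata hpre children.length (le_refl _)
  rw [hA, hB]
  dsimp only
  rw [pvFinalNum children Ndata _ (pvL_length children Ndata children.length)]
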